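-- pv_equiv track=rewrite | github.com/semanurcetintas/client-server- | server.py | _pf_extract_cipher_letters
-- ===== SOURCE A (Python) =====
-- def _pf_extract_cipher_letters(text: str):
--     letters = []
--     idx_map = []
--     for i, ch in enumerate(text):
--         if ch.isalpha():
--             letters.append("I" if ch.upper()=="J" else ch.upper())
--             idx_map.append(i)
--     if len(letters) % 2 == 1:
--         letters.append("X")
--         idx_map.append(None)
--     pairs = []
--     for i in range(0, len(letters), 2):
--         pairs.append((letters[i], letters[i+1]))
--     return pairs, idx_map
-- ===== SOURCE B (Python) =====
-- def _pf_extract_cipher_letters(text: str):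
--     pairs = []
--     idx_map = []
--     pending = None
--     for i, ch in enumerate(text):
--         if not ch.isalpha():
--             continue
--         letter = "I" if ch.upper() == "J" else ch.upper()
--         idx_map.append(i)
--         if pending is None:
--             pending = letter
--         else:
--             pairs.append((pending, letter))
--             pending = None
--     if pending is not None:
--         pairs.append((pending, "X"))
--         idx_map.append(None)
--     return pairs, idx_map
-- ===== Notes on version B (the rewrite author's own statement) =====
-- stated objective: alternative
-- what changed: Single fused pass that pairs letters incrementally via a held-over unpaired letter, instead of building the full letters list and then striding over it by index in a second loop.
import Mathlib
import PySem

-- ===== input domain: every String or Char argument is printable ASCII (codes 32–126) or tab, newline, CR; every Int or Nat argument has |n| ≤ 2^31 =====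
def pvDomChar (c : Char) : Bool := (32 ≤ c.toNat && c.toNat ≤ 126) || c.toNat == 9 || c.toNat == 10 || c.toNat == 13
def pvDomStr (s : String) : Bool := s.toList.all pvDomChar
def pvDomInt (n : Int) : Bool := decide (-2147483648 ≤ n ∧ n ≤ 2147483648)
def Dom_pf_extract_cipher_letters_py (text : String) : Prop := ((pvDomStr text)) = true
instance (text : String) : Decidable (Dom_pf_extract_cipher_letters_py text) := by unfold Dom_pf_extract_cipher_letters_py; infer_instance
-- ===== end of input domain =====

-- B replaces A's two-phase build (full letters list, then an index-striding pairing loop)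
-- by one fused pass holding at most one unpaired letter; same return value (objective: alternative).

-- ===== PORT A =====
-- the body of A's first loop: collect normalized letters and their indices
def pvStepA (acc : List String × List (Option Int)) (p : Int × Char) :
    List String × List (Option Int) :=
  if PySem.Chars.isalpha p.2 then
    (acc.1 ++ [if String.ofList [PySem.Chars.upperChar p.2] == "J" then "I"
               else String.ofList [PySem.Chars.upperChar p.2]],
     acc.2 ++ [some p.1])
  else acc

def pf_extract_cipher_letters_py (text : String) :
    (List (String × String)) × List (Option Int) :=
  let st := (PySem.List.enumerate text.toList 0).foldl pvStepA ([], [])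
  let lid := if st.1.length % 2 == 1 then (st.1 ++ ["X"], st.2 ++ [(none : Option Int)]) else st
  let pairs := (PySem.List.pyRange 0 (lid.1.length : Int) 2).foldl
    (fun acc i => acc ++ [(PySem.List.pyGetD lid.1 i "", PySem.List.pyGetD lid.1 (i + 1) "")]) []
  (pairs, lid.2)

-- ===== PORT B =====
-- the body of B's single loop: state is (pairs, idx_map, held-over letter)
def pvStepB (acc : List (String × String) × List (Option Int) × Option String) (p : Int × Char) :
    List (String × String) × List (Option Int) × Option String :=
  if PySem.Chars.isalpha p.2 then
    let letter := if String.ofList [PySem.Chars.upperChar p.2] == "J" then "I"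
                  else String.ofList [PySem.Chars.upperChar p.2]
    match acc.2.2 with
    | none => (acc.1, acc.2.1 ++ [some p.1], some letter)
    | some pnd => (acc.1 ++ [(pnd, letter)], acc.2.1 ++ [some p.1], none)
  else acc

def pf_extract_cipher_letters_py_alt (text : String) :
    (List (String × String)) × List (Option Int) :=
  let st := (PySem.List.enumerate text.toList 0).foldl pvStepB ([], [], none)
  match st.2.2 with
  | none => (st.1, st.2.1)
  | some pnd => (st.1 ++ [(pnd, "X")], st.2.1 ++ [(none : Option Int)])

-- ===== PRECONDITION & SPEC =====
def Spec_pf_extract_cipher_letters_py (text : String) (out : (List (String × String)) × List (Option Int)) : Prop := out = pf_extract_cipher_letters_py_alt text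
instance (text : String) (out : (List (String × String)) × List (Option Int)) : Decidable (Spec_pf_extract_cipher_letters_py text out) := by unfold Spec_pf_extract_cipher_letters_py; infer_instance

-- ===== CLAIM (what is proved, stated in full; the proofs are below) =====
def Claim_equal_pf_extract_cipher_letters_py : Prop := ∀ (text : String), Dom_pf_extract_cipher_letters_py text → Spec_pf_extract_cipher_letters_py text (pf_extract_cipher_letters_py text)

-- ===== LEMMAS AND PROOFS =====

-- A's letters list, reconstructed from B's state: paired letters flattened, then the held-over one
def pvGlue (P : List (String × String)) (x : Option String) : List String :=
  P.flatMap (fun q => [q.1, q.2]) ++ x.toList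

theorem pvGlue_len (P : List (String × String)) :
    (P.flatMap (fun q => [q.1, q.2])).length = 2 * P.length := by
  induction P with
  | nil => simp
  | cons q t ih => simp [ih]; omega

-- loop correspondence: A's fold state is pvGlue of B's fold state
theorem pvLoopAB (l : List (Int × Char)) :
    ∀ (P : List (String × String)) (I : List (Option Int)) (x : Option String),
      l.foldl pvStepA (pvGlue P x, I) =
        (pvGlue (l.foldl pvStepB (P, I, x)).1 (l.foldl pvStepB (P, I, x)).2.2,
         (l.foldl pvStepB (P, I, x)).2.1) := by
  induction l with
  | nil => intro P I x; simp [pvGlue]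
  | cons p t ih =>
    intro P I x
    by_cases h : PySem.Chars.isalpha p.2
    · cases x with
      | none =>
        have : pvStepA (pvGlue P none, I) p = (pvGlue P (some (if String.ofList [PySem.Chars.upperChar p.2] == "J" then "I" else String.ofList [PySem.Chars.upperChar p.2])), I ++ [some p.1]) := by
          simp [pvStepA, pvGlue, h]
        simp only [List.foldl_cons, this, pvStepB, h, if_pos]
        exact ih _ _ _
      | some pnd =>
        have : pvStepA (pvGlue P (some pnd), I) p = (pvGlue (P ++ [(pnd, (if String.ofList [PySem.Chars.upperChar p.2] == "J" then "I" else String.ofList [PySem.Chars.upperChar p.2]))]) none, I ++ [some p.1]) := by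
          simp [pvStepA, pvGlue, h]
        simp only [List.foldl_cons, this, pvStepB, h, if_pos]
        exact ih _ _ _
    · simp only [List.foldl_cons, pvStepA, pvStepB, h, if_neg, Bool.false_eq_true,
        not_false_eq_true]
      exact ih _ _ _

-- the Nat-level pairing loop equals the pair list itself
theorem pvPairsNat (Q : List (String × String)) :
    (List.range Q.length).map
      (fun k => ((Q.flatMap (fun q => [q.1, q.2])).getD (2 * k) "",
                 (Q.flatMap (fun q => [q.1, q.2])).getD (2 * k + 1) "")) = Q := by
  induction Q with
  | nil => simp
  | cons q t ih =>
    simp only [List.length_cons, List.range_succ_eq_map, List.map_cons, List.map_map]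
    refine List.cons_eq_cons.mpr ⟨by simp, ?_⟩
    conv_rhs => rw [← ih]
    apply List.map_congr_left
    intro k _
    have e1 : 2 * Nat.succ k = 2 * k + 1 + 1 := by omega
    have e2 : 2 * Nat.succ k + 1 = 2 * k + 1 + 1 + 1 := by omega
    simp only [Function.comp, List.flatMap_cons, List.cons_append, List.nil_append, e1,
      List.getD_cons_succ]

-- A's index-striding pairing loop applied to a fully paired letters list returns the pairs
theorem pvPairsA (Q : List (String × String)) :
    (PySem.List.pyRange 0 (((Q.flatMap (fun q => [q.1, q.2])).length : Int)) 2).foldl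
      (fun acc i => acc ++ [(PySem.List.pyGetD (Q.flatMap (fun q => [q.1, q.2])) i "",
                             PySem.List.pyGetD (Q.flatMap (fun q => [q.1, q.2])) (i + 1) "")]) [] = Q := by
  rw [PySem.List.foldl_append_singleton_eq_map, PySem.List.pyRange_of_pos _ _ (by norm_num)]
  have hlen := pvGlue_len Q
  have hcount : (if (0:Int) < ((Q.flatMap (fun q => [q.1, q.2])).length : Int)
      then ((((Q.flatMap (fun q => [q.1, q.2])).length : Int) - 0 + 2 - 1) / 2).toNat else 0) = Q.length := by
    rw [hlen]; split <;> omega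
  rw [hcount, List.map_map, List.nil_append]
  conv_rhs => rw [← pvPairsNat Q]
  apply List.map_congr_left
  intro k _
  simp only [Function.comp]
  rw [show (0 : Int) + 2 * (k : Int) = ((2 * k : Nat) : Int) from by push_cast; ring]
  rw [show ((2 * k : Nat) : Int) + 1 = ((2 * k + 1 : Nat) : Int) from by push_cast; ring]
  rw [PySem.List.pyGetD_natCast, PySem.List.pyGetD_natCast]

-- ===== VERDICT (by name: the statement is the Claim_ definition above) =====
theorem pf_extract_cipher_letters_py_spec : Claim_equal_pf_extract_cipher_letters_py := by
  intro text _
  unfold Spec_pf_extract_cipher_letters_py pf_extract_cipher_letters_py pf_extract_cipher_letters_py_alt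
  dsimp only
  rw [show (([], []) : List String × List (Option Int)) = (pvGlue [] none, []) from by simp [pvGlue],
      pvLoopAB]
  rcases h : (PySem.List.enumerate text.toList 0).foldl pvStepB ([], [], none) with ⟨P, I, x⟩
  dsimp only
  cases x with
  | none =>
    have hlen := pvGlue_len P
    rw [if_neg (by simp only [pvGlue, Option.toList_none, List.append_nil, beq_iff_eq, hlen]; omega)]
    dsimp only
    rw [show pvGlue P none = P.flatMap (fun q => [q.1, q.2]) from by simp [pvGlue], pvPairsA]
  | some pnd =>
    have hlen := pvGlue_len P
    rw [if_pos (by simp only [pvGlue, Option.toList_some, List.length_append, List.length_cons,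
      List.length_nil, beq_iff_eq, hlen]; omega)]
    dsimp only
    rw [show pvGlue P (some pnd) ++ ["X"] = (P ++ [(pnd, "X")]).flatMap (fun q => [q.1, q.2]) from by
      simp [pvGlue], pvPairsA]
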